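-- pv_equiv track=rewrite | github.com/akshay-patil-arcitech/hipaa-safe-transcription-pipeline | whisperx_utils.py | _parse_masking_entities
-- ===== SOURCE A (Python) =====
-- PII_ENTITY_SET = [
--     "PERSON",
--     "PHONE_NUMBER",
--     "EMAIL_ADDRESS",
--     "IP_ADDRESS",
--     "US_SSN",
--     "US_PASSPORT",
--     "US_DRIVER_LICENSE",
--     "CREDIT_CARD",
--     "IBAN_CODE",
--     "BANK_ACCOUNT",
--     "US_ITIN",
--     "URL",
-- ]
--
-- PHI_ENTITY_SET = [
--     "PERSON",
--     "DATE_TIME",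
--     "LOCATION",
--     "PHONE_NUMBER",
--     "EMAIL_ADDRESS",
--     "US_SSN",
--     "US_PASSPORT",
--     "US_DRIVER_LICENSE",
--     "IP_ADDRESS",
--     "CREDIT_CARD",
--     "IBAN_CODE",
--     "BANK_ACCOUNT",
--     "US_ITIN",
--     "URL",
--     "MEDICAL_LICENSE",
--     "DATE_OF_BIRTH",
--     "MRN",
--     "US_NPI",
--     "ICD10",
--     "CPT",
--     "US_SSN_COMPACT",
--     "DATE_GENERIC",
--     "AGE",
--     "ADDRESS",
--     "ZIP",
--     "STATE_ID",
-- ]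
--
-- def _parse_masking_entities(value: str | None) -> list[str] | None:
--     if value is None:
--         return None
--     raw = [item.strip() for item in value.split(",") if item.strip()]
--     if not raw:
--         return None
--     items: list[str] = []
--     for item in raw:
--         key = item.upper()
--         if key == "PII":
--             items.extend(PII_ENTITY_SET)
--         elif key == "PHI":
--             items.extend(PHI_ENTITY_SET)
--         elif key == "HIPAA":
--             items.extend(PHI_ENTITY_SET)
--         else:
--             items.append(item)
--     seen = set()
--     deduped: list[str] = []
--     for item in items:
--         if item not in seen:
--             seen.add(item)
--             deduped.append(item)
--     return deduped or None
-- ===== SOURCE B (Python) =====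
-- PII_ENTITY_SET = [
--     "PERSON",
--     "PHONE_NUMBER",
--     "EMAIL_ADDRESS",
--     "IP_ADDRESS",
--     "US_SSN",
--     "US_PASSPORT",
--     "US_DRIVER_LICENSE",
--     "CREDIT_CARD",
--     "IBAN_CODE",
--     "BANK_ACCOUNT",
--     "US_ITIN",
--     "URL",
-- ]
--
-- PHI_ENTITY_SET = [
--     "PERSON",
--     "DATE_TIME",
--     "LOCATION",
--     "PHONE_NUMBER",
--     "EMAIL_ADDRESS",
--     "US_SSN",
--     "US_PASSPORT",
--     "US_DRIVER_LICENSE",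
--     "IP_ADDRESS",
--     "CREDIT_CARD",
--     "IBAN_CODE",
--     "BANK_ACCOUNT",
--     "US_ITIN",
--     "URL",
--     "MEDICAL_LICENSE",
--     "DATE_OF_BIRTH",
--     "MRN",
--     "US_NPI",
--     "ICD10",
--     "CPT",
--     "US_SSN_COMPACT",
--     "DATE_GENERIC",
--     "AGE",
--     "ADDRESS",
--     "ZIP",
--     "STATE_ID",
-- ]
--
-- _ALIASES = {
--     "PII": PII_ENTITY_SET,
--     "PHI": PHI_ENTITY_SET,
--     "HIPAA": PHI_ENTITY_SET,
-- }
--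
--
-- def _expand(token):
--     # each expansion is internally duplicate-free (the alias tables have no repeats)
--     return _ALIASES.get(token.upper(), [token])
--
--
-- def _parse_masking_entities(value):
--     if value is None:
--         return None
--     raw = [item.strip() for item in value.split(",") if item.strip()]
--     if not raw:
--         return None
--     # Build the result BACK-TO-FRONT: walk the tokens in reverse, prepending each
--     # token's expansion and dropping from the suffix result anything the expansion
--     # already provides.  First-occurrence order falls out: an earlier token's
--     # entities always displace later duplicates.  No seen-set, no intermediate
--     # expanded list.  Nonempty since every expansion is nonempty.
--     out = []
--     for token in reversed(raw):
--         exp = _expand(token)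
--         out = exp + [e for e in out if e not in exp]
--     return out
-- ===== Notes on version B (the rewrite author's own statement) =====
-- stated objective: alternative
-- what changed: Replaces A's two staged passes (expand every alias into one big intermediate list, then dedup it with a seen-set) by a back-to-front merge: walk the tokens in reverse, prepending each token's expansion and filtering its entities out of the suffix result by list membership - no seen-set and no intermediate expanded list; it relies on the alias tables being duplicate-free.
import Mathlib
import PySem

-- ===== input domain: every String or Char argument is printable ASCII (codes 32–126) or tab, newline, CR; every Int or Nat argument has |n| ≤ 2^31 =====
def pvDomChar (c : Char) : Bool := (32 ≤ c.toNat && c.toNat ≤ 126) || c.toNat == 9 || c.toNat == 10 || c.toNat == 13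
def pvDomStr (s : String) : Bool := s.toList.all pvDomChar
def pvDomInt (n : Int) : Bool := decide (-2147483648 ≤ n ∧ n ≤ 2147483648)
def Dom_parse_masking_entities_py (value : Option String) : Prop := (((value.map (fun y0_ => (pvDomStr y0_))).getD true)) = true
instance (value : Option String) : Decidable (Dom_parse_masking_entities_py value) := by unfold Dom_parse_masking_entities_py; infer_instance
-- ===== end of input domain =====

-- B replaces A's staged expand-then-dedup (intermediate list + seen-set) by a reversed
-- back-to-front merge with list-membership filtering (objective: alternative, same cost class).

-- ===== PORT A =====
def pvPII : List String :=
  ["PERSON", "PHONE_NUMBER", "EMAIL_ADDRESS", "IP_ADDRESS", "US_SSN", "US_PASSPORT",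
   "US_DRIVER_LICENSE", "CREDIT_CARD", "IBAN_CODE", "BANK_ACCOUNT", "US_ITIN", "URL"]

def pvPHI : List String :=
  ["PERSON", "DATE_TIME", "LOCATION", "PHONE_NUMBER", "EMAIL_ADDRESS", "US_SSN", "US_PASSPORT",
   "US_DRIVER_LICENSE", "IP_ADDRESS", "CREDIT_CARD", "IBAN_CODE", "BANK_ACCOUNT", "US_ITIN",
   "URL", "MEDICAL_LICENSE", "DATE_OF_BIRTH", "MRN", "US_NPI", "ICD10", "CPT", "US_SSN_COMPACT",
   "DATE_GENERIC", "AGE", "ADDRESS", "ZIP", "STATE_ID"]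

-- raw = [item.strip() for item in value.split(",") if item.strip()]  (split? is total: sep "," ≠ "")
def pvRaw (v : String) : List String :=
  (((PySem.Str.split? v ",").getD []).map PySem.Str.strip).filter (fun s => s != "")

-- A's dedup step: 'if item not in seen: seen.add(item); deduped.append(item)'
def pvDedupStep (st : PySem.Set String × List String) (item : String) :
    PySem.Set String × List String :=
  if PySem.Set.contains st.1 item then st else (PySem.Set.add st.1 item, st.2 ++ [item])

def parse_masking_entities_py (value : Option String) : Option (List String) :=
  match value with
  | none => none
  | some v =>
    let raw := pvRaw v
    if raw = [] then none
    else
      let items := raw.foldl (fun acc item =>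
        let key := PySem.Str.upper item
        if key = "PII" then acc ++ pvPII
        else if key = "PHI" then acc ++ pvPHI
        else if key = "HIPAA" then acc ++ pvPHI
        else acc ++ [item]) []
      let st := items.foldl pvDedupStep (PySem.Set.empty, [])
      if st.2 = [] then none else some st.2

-- ===== PORT B =====
def pvAliasDict : PySem.Dict String (List String) :=
  PySem.Dict.ofList [("PII", pvPII), ("PHI", pvPHI), ("HIPAA", pvPHI)]

-- _expand(token) = _ALIASES.get(token.upper(), [token])
def pvExpandB (token : String) : List String :=
  PySem.Dict.getD pvAliasDict (PySem.Str.upper token) [token]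

def parse_masking_entities_py_alt (value : Option String) : Option (List String) :=
  match value with
  | none => none
  | some v =>
    let raw := pvRaw v
    if raw = [] then none
    else
      -- for token in reversed(raw): out = exp + [e for e in out if e not in exp]
      some (raw.reverse.foldl (fun out token =>
        let exp := pvExpandB token
        exp ++ out.filter (fun e => !(exp.contains e))) [])

-- ===== PRECONDITION & SPEC =====
def Spec_parse_masking_entities_py (value : Option String) (out : Option (List String)) : Prop := out = parse_masking_entities_py_alt value
instance (value : Option String) (out : Option (List String)) : Decidable (Spec_parse_masking_entities_py value out) := by unfold Spec_parse_masking_entities_py; infer_instance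

-- ===== CLAIM (what is proved, stated in full; the proofs are below) =====
def Claim_equal_parse_masking_entities_py : Prop := ∀ (value : Option String), Dom_parse_masking_entities_py value → Spec_parse_masking_entities_py value (parse_masking_entities_py value)

-- ===== LEMMAS AND PROOFS =====

-- A's per-token expansion, as a function of the token
def pvExpand (item : String) : List String :=
  let key := PySem.Str.upper item
  if key = "PII" then pvPII
  else if key = "PHI" then pvPHI
  else if key = "HIPAA" then pvPHI
  else [item]

lemma pvItems_eq_flatMap (raw : List String) :
    raw.foldl (fun acc item =>
        let key := PySem.Str.upper item
        if key = "PII" then acc ++ pvPII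
        else if key = "PHI" then acc ++ pvPHI
        else if key = "HIPAA" then acc ++ pvPHI
        else acc ++ [item]) [] = raw.flatMap pvExpand := by
  have h : (fun (acc : List String) (item : String) =>
        let key := PySem.Str.upper item
        if key = "PII" then acc ++ pvPII
        else if key = "PHI" then acc ++ pvPHI
        else if key = "HIPAA" then acc ++ pvPHI
        else acc ++ [item]) = fun acc item => acc ++ pvExpand item := by
    funext acc item
    simp only [pvExpand]
    split_ifs <;> rfl
  rw [h, PySem.List.foldl_append_eq_flatMap, List.nil_append]

lemma pvExpandB_eq_expand (item : String) :
    pvExpandB item = pvExpand item := by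
  have hd : pvAliasDict = PySem.Dict.mk [("PII", pvPII), ("PHI", pvPHI), ("HIPAA", pvPHI)] := rfl
  simp only [pvExpandB, pvExpand, hd, PySem.Dict.getD_eq_get?_getD, PySem.Dict.get?_mk_cons]
  split_ifs with h1 h2 h3 <;> simp_all [PySem.Dict.get?]

lemma pvExpand_nodup (item : String) : (pvExpand item).Nodup := by
  simp only [pvExpand]
  split_ifs <;> first | decide | simp

lemma pvExpand_ne_nil (item : String) : pvExpand item ≠ [] := by
  simp only [pvExpand]
  split_ifs <;> simp [pvPII, pvPHI]

-- A's dedup fold keeps seen = deduped; both are Set.update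
lemma pvDedup_foldl (l : List String) (s : PySem.Set String) :
    l.foldl pvDedupStep (s, s) = (PySem.Set.update s l, PySem.Set.update s l) := by
  induction l generalizing s with
  | nil => rfl
  | cons x t ih =>
    have hstep : pvDedupStep (s, s) x = (PySem.Set.add s x, PySem.Set.add s x) := by
      simp only [pvDedupStep, PySem.Set.add]
      split_ifs <;> rfl
    simp only [List.foldl_cons, hstep, ih, PySem.Set.update_cons]

-- the merge: first-occurrence dedup of the concatenated expansions
lemma pvMerge_eq_ofList (raw : List String) :
    raw.foldr (fun token out =>
        pvExpand token ++ out.filter (fun e => !((pvExpand token).contains e))) []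
      = PySem.Set.ofList (raw.flatMap pvExpand) := by
  induction raw with
  | nil => rfl
  | cons h t ih =>
    rw [List.foldr_cons, ih, List.flatMap_cons, PySem.Set.ofList_append,
        PySem.Set.ofList_eq_self_of_nodup _ (pvExpand_nodup h),
        PySem.Set.update_eq_append_filter]
    simp [PySem.Set.contains_eq_listContains]

lemma pvOfList_ne_nil {xs : List String} (h : xs ≠ []) : PySem.Set.ofList xs ≠ [] := by
  cases xs with
  | nil => exact absurd rfl h
  | cons x t => rw [PySem.Set.ofList_cons]; exact List.cons_ne_nil _ _

-- ===== VERDICT (by name: the statement is the Claim_ definition above) =====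
theorem parse_masking_entities_py_spec : Claim_equal_parse_masking_entities_py := by
  intro value _
  unfold Spec_parse_masking_entities_py parse_masking_entities_py parse_masking_entities_py_alt
  match value with
  | none => rfl
  | some v =>
    simp only
    by_cases hr : pvRaw v = []
    · simp [hr]
    · simp only [if_neg hr]
      have hB : (pvRaw v).reverse.foldl (fun out token =>
            pvExpandB token ++ out.filter (fun e => !((pvExpandB token).contains e))) []
          = (pvRaw v).foldr (fun token out =>
            pvExpand token ++ out.filter (fun e => !((pvExpand token).contains e))) [] := by
        rw [List.foldl_reverse]
        simp only [pvExpandB_eq_expand]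
      have hempty : (PySem.Set.empty : PySem.Set String) = ([] : List String) := rfl
      rw [pvItems_eq_flatMap]
      have hfold := pvDedup_foldl ((pvRaw v).flatMap pvExpand) ([] : PySem.Set String)
      rw [hempty, hfold]
      have hflat : (pvRaw v).flatMap pvExpand ≠ [] := by
        cases hraw : pvRaw v with
        | nil => exact absurd hraw hr
        | cons h t =>
          rw [List.flatMap_cons]
          intro hc
          exact pvExpand_ne_nil h (List.append_eq_nil_iff.mp hc).1
      have hne : PySem.Set.update ([] : PySem.Set String) ((pvRaw v).flatMap pvExpand) ≠ [] := by
        rw [PySem.Set.update_nil_left]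
        exact pvOfList_ne_nil hflat
      rw [if_neg hne, hB, pvMerge_eq_ofList, ← PySem.Set.update_nil_left]
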